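-- pv_equiv track=rewrite | github.com/sungwonnoh/codetree-TILs | 240810/xor 결과 최대 만들기/max-of-xor.py | max_xor_subset
-- ===== SOURCE A (Python) =====
-- import itertools
--
-- def max_xor_subset(arr, m):
--     max_xor = 0
--     for subset in itertools.combinations(arr, m):
--         xor_value = 0
--
--         for num in subset:
--             xor_value ^= num
--
--         max_xor = max(max_xor, xor_value)
--
--     return max_xor
-- ===== SOURCE B (Python) =====
-- def max_xor_subset(arr, m):
--     # DP over achievable XOR values keyed by subset size: dp[k] = all XOR
--     # values obtainable from exactly k elements seen so far.
--     if m > len(arr):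
--         return 0
--     dp = [set() for _ in range(m + 1)]
--     dp[0].add(0)
--     for num in arr:
--         for k in range(m - 1, -1, -1):
--             dp[k + 1] |= {v ^ num for v in dp[k]}
--     best = 0
--     for v in dp[m]:
--         best = max(best, v)
--     return best
-- ===== Notes on version B (the rewrite author's own statement) =====
-- stated objective: alternative
-- what changed: Replaces brute-force enumeration of all C(n,m) combinations with an incremental DP over sets of achievable XOR values keyed by subset size (dp[k] = XOR values of k-element subsets), deduplicating equal partial XORs as it goes.
import Mathlib
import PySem

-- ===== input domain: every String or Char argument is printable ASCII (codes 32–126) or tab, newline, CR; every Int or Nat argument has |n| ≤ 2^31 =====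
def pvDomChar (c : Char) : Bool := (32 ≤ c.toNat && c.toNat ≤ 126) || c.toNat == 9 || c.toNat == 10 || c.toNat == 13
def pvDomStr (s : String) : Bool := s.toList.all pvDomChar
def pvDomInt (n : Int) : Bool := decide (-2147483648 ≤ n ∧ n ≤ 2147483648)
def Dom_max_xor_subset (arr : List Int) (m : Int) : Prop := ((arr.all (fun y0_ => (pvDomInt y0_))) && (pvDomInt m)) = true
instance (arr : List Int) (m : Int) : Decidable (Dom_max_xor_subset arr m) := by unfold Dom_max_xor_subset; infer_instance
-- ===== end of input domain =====

-- B replaces brute-force enumeration of all C(n,m) combinations with a subset-size-indexed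
-- DP over sets of achievable XOR values (objective: alternative algorithm; no speed claim).

-- ===== PORT A =====
-- hand port of itertools.combinations(arr, r): the r-element order-preserving
-- subsequences of arr (exact: same tuples, Python's yield order, lexicographic by index)
def pvCombos : Nat → List Int → List (List Int)
  | 0, _ => [[]]
  | _+1, [] => []
  | r+1, x :: xs => (pvCombos r xs).map (fun s => x :: s) ++ pvCombos (r+1) xs

def max_xor_subset (arr : List Int) (m : Int) : Int :=
  (pvCombos m.toNat arr).foldl
    (fun max_xor subset =>
      max max_xor (subset.foldl (fun xor_value num => PySem.Int.bxor xor_value num) 0))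
    0

-- ===== PORT B =====
-- one round of B's inner 'for k in range(m-1,-1,-1)' loop: k descends and iteration k
-- writes dp[k+1] reading dp[k], so every read sees the pre-round value and the round is
-- the simultaneous update dp[k+1] |= {v ^ num for v in dp[k]} for every k; zipWith pairs
-- each dp[k+1] with its pre-round predecessor dp[k].
def pvRound (num : Int) (dp : List (PySem.Set Int)) : List (PySem.Set Int) :=
  match dp with
  | [] => []
  | s0 :: rest =>
      s0 :: List.zipWith
        (fun s prev => PySem.Set.union s (prev.map (fun v => PySem.Int.bxor v num)))
        rest dp

-- B's final 'best = 0; for v in dp[m]: best = max(best, v)' — max over a set,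
-- independent of Python's set iteration order
def pvBest (s : PySem.Set Int) : Int :=
  s.foldl (fun best v => max best v) 0

def max_xor_subset_alt (arr : List Int) (m : Int) : Int :=
  if m > arr.length then 0
  else pvBest ((PySem.List.pyGet?
      (arr.foldl (fun d num => pvRound num d)
        (PySem.Set.add PySem.Set.empty (0 : Int) :: List.replicate m.toNat PySem.Set.empty))
      m).getD PySem.Set.empty)

-- ===== PRECONDITION & SPEC =====
-- Pre_ excludes m < 0, where A raises ValueError (itertools.combinations) and B raises IndexError.
def Pre_max_xor_subset (arr : List Int) (m : Int) : Prop := 0 ≤ m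
instance (arr : List Int) (m : Int) : Decidable (Pre_max_xor_subset arr m) := by unfold Pre_max_xor_subset; infer_instance
def pvWitness_max_xor_subset : List Int × Int := ([1, 2, 3], 2)
def Spec_max_xor_subset (arr : List Int) (m : Int) (out : Int) : Prop := out = max_xor_subset_alt arr m
instance (arr : List Int) (m : Int) (out : Int) : Decidable (Spec_max_xor_subset arr m out) := by unfold Spec_max_xor_subset; infer_instance

-- ===== CLAIM (what is proved, stated in full; the proofs are below) =====
def Claim_equal_max_xor_subset : Prop := ∀ (arr : List Int) (m : Int), Dom_max_xor_subset arr m → Pre_max_xor_subset arr m → Spec_max_xor_subset arr m (max_xor_subset arr m)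

-- ===== LEMMAS AND PROOFS =====

-- membership in pvCombos through a cons
theorem pv_mem_combos_cons (k : Nat) (x : Int) (rest : List Int) (s : List Int) :
    s ∈ pvCombos k (x :: rest) ↔
      s ∈ pvCombos k rest ∨ (0 < k ∧ ∃ t ∈ pvCombos (k - 1) rest, s = x :: t) := by
  cases k with
  | zero => simp [pvCombos]
  | succ r =>
    simp [pvCombos, List.mem_append, List.mem_map]
    constructor
    · rintro (⟨t, ht, rfl⟩ | h)
      · exact Or.inr ⟨t, ht, rfl⟩
      · exact Or.inl h
    · rintro (h | ⟨t, ht, rfl⟩)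
      · exact Or.inr h
      · exact Or.inl ⟨t, ht, rfl⟩

theorem pv_length_round (num : Int) (dp : List (PySem.Set Int)) :
    (pvRound num dp).length = dp.length := by
  cases dp with
  | nil => rfl
  | cons s0 rest => simp [pvRound]

theorem pv_length_foldl_round (arr : List Int) (dp : List (PySem.Set Int)) :
    (arr.foldl (fun d num => pvRound num d) dp).length = dp.length := by
  induction arr generalizing dp with
  | nil => rfl
  | cons x rest ih => simp [List.foldl_cons, ih, pv_length_round]

-- membership after one round, stated with getD (default ∅)
theorem pv_mem_round (num : Int) (v : Int) (dp : List (PySem.Set Int)) (j : Nat)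
    (hj : j < dp.length) :
    v ∈ (pvRound num dp).getD j PySem.Set.empty ↔
      v ∈ dp.getD j PySem.Set.empty ∨
        (0 < j ∧ ∃ u ∈ dp.getD (j - 1) PySem.Set.empty, v = PySem.Int.bxor u num) := by
  cases dp with
  | nil => simp at hj
  | cons s0 rest =>
    cases j with
    | zero => simp [pvRound]
    | succ j =>
      have hjr : j < rest.length := by simpa using hj
      have hz : j < (List.zipWith
          (fun s prev => PySem.Set.union s (prev.map (fun v => PySem.Int.bxor v num)))
          rest (s0 :: rest)).length := by
        simp [List.length_zipWith]; omega
      simp only [pvRound, List.getD_cons_succ, Nat.succ_sub_one, Nat.zero_lt_succ, true_and]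
      rw [List.getD_eq_getElem _ _ hz, List.getElem_zipWith,
          List.getD_eq_getElem _ _ hjr, List.getD_eq_getElem _ _ (by simp only [List.length_cons]; omega)]
      rw [PySem.Set.mem_union]
      constructor
      · rintro (h | h)
        · exact Or.inl h
        · rcases List.mem_map.mp h with ⟨u, hu, rfl⟩
          exact Or.inr ⟨u, hu, rfl⟩
      · rintro (h | ⟨u, hu, rfl⟩)
        · exact Or.inl h
        · exact Or.inr (List.mem_map.mpr ⟨u, hu, rfl⟩)

-- main DP invariant: after folding arr, dp[j] holds exactly the values obtained by
-- xoring some (j-i)-combination of arr onto some value of the initial dp[i]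
theorem pv_main (arr : List Int) :
    ∀ (dp : List (PySem.Set Int)) (j : Nat) (v : Int), j < dp.length →
      (v ∈ (arr.foldl (fun d num => pvRound num d) dp).getD j PySem.Set.empty ↔
        ∃ i, i ≤ j ∧ ∃ s ∈ pvCombos (j - i) arr,
          ∃ w ∈ dp.getD i PySem.Set.empty, v = s.foldl (fun a b => PySem.Int.bxor a b) w) := by
  induction arr with
  | nil =>
    intro dp j v hj
    simp only [List.foldl_nil]
    constructor
    · intro hv
      exact ⟨j, le_refl j, [], by simp [pvCombos], v, hv, rfl⟩
    · rintro ⟨i, hij, s, hs, w, hw, rfl⟩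
      by_cases h : j - i = 0
      · have : i = j := by omega
        subst this
        simp [pvCombos] at hs
        subst hs
        simpa using hw
      · rcases Nat.exists_eq_succ_of_ne_zero h with ⟨r, hr⟩
        rw [hr] at hs
        simp [pvCombos] at hs
  | cons x rest ih =>
    intro dp j v hj
    simp only [List.foldl_cons]
    rw [ih (pvRound x dp) j v (by rw [pv_length_round]; exact hj)]
    constructor
    · rintro ⟨i, hij, s, hs, w, hw, rfl⟩
      rw [pv_mem_round x w dp i (by omega)] at hw
      rcases hw with hw | ⟨hipos, u, hu, rfl⟩
      · exact ⟨i, hij, s, (pv_mem_combos_cons _ x rest s).mpr (Or.inl hs), w, hw, rfl⟩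
      · refine ⟨i - 1, by omega, x :: s, ?_, u, hu, ?_⟩
        · refine (pv_mem_combos_cons _ x rest _).mpr (Or.inr ⟨by omega, s, ?_, rfl⟩)
          have : j - (i - 1) - 1 = j - i := by omega
          rw [this]; exact hs
        · simp [List.foldl_cons]
    · rintro ⟨i, hij, s, hs, w, hw, rfl⟩
      rw [pv_mem_combos_cons _ x rest s] at hs
      rcases hs with hs | ⟨hpos, t, ht, rfl⟩
      · refine ⟨i, hij, s, hs, w, ?_, rfl⟩
        rw [pv_mem_round x w dp i (by omega)]
        exact Or.inl hw
      · refine ⟨i + 1, by omega, t, ?_, PySem.Int.bxor w x, ?_, ?_⟩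
        · have : j - (i + 1) = j - i - 1 := by omega
          rw [this]; exact ht
        · rw [pv_mem_round _ _ dp (i + 1) (by omega)]
          exact Or.inr ⟨by omega, w, by simpa using hw, rfl⟩
        · simp [List.foldl_cons]

-- foldl max facts
theorem pv_init_le_fm (l : List Int) : ∀ a : Int, a ≤ l.foldl max a := by
  induction l with
  | nil => intro a; simp
  | cons x rest ih =>
    intro a
    calc a ≤ max a x := le_max_left a x
    _ ≤ rest.foldl max (max a x) := ih _
    _ = (x :: rest).foldl max a := rfl

theorem pv_mem_le_fm (l : List Int) : ∀ (a x : Int), x ∈ l → x ≤ l.foldl max a := by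
  induction l with
  | nil => intro a x h; simp at h
  | cons y rest ih =>
    intro a x h
    rcases List.mem_cons.mp h with rfl | h
    · calc x ≤ max a x := le_max_right a x
      _ ≤ rest.foldl max (max a x) := pv_init_le_fm rest _
    · exact ih _ x h

theorem pv_fm_le (l : List Int) : ∀ (a c : Int), a ≤ c → (∀ x ∈ l, x ≤ c) → l.foldl max a ≤ c := by
  induction l with
  | nil => intro a c h _; simpa using h
  | cons y rest ih =>
    intro a c h hall
    exact ih _ c (max_le h (hall y (by simp))) fun x hx => hall x (by simp [hx])

-- foldl max 0 depends only on the members of the list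
theorem pv_fm_congr (l l' : List Int) (h : ∀ x, x ∈ l ↔ x ∈ l') :
    l.foldl max 0 = l'.foldl max 0 := by
  apply le_antisymm
  · exact pv_fm_le l 0 _ (pv_init_le_fm l' 0) fun x hx => pv_mem_le_fm l' 0 x ((h x).mp hx)
  · exact pv_fm_le l' 0 _ (pv_init_le_fm l 0) fun x hx => pv_mem_le_fm l 0 x ((h x).mpr hx)

theorem pv_getD_replicate_empty (n k : Nat) :
    (List.replicate n (PySem.Set.empty : PySem.Set Int)).getD k PySem.Set.empty
      = PySem.Set.empty := by
  rw [List.getD_eq_getElem?_getD]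
  rcases h : (List.replicate n (PySem.Set.empty : PySem.Set Int))[k]? with _ | s
  · rfl
  · have := List.mem_of_getElem? h
    simp [List.eq_of_mem_replicate this]

-- choosing more elements than the list has yields no combination
theorem pv_combos_gt_length : ∀ (xs : List Int) (k : Nat), xs.length < k → pvCombos k xs = [] := by
  intro xs
  induction xs with
  | nil => intro k hk; cases k with
    | zero => omega
    | succ r => rfl
  | cons x rest ih =>
    intro k hk
    cases k with
    | zero => omega
    | succ r =>
      simp only [pvCombos, ih r (by simp at hk; omega), ih (r+1) (by simp at hk; omega),
        List.map_nil, List.nil_append]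

theorem pv_final (arr : List Int) (m : Int) (hm : 0 ≤ m) :
    max_xor_subset arr m = max_xor_subset_alt arr m := by
  unfold max_xor_subset max_xor_subset_alt pvBest
  by_cases hbig : m > arr.length
  · rw [if_pos hbig, pv_combos_gt_length arr m.toNat (by omega), List.foldl_nil]
  rw [if_neg hbig]
  have hlen : (arr.foldl (fun d num => pvRound num d)
      (PySem.Set.add PySem.Set.empty (0 : Int) :: List.replicate m.toNat PySem.Set.empty)).length
      = m.toNat + 1 := by
    rw [pv_length_foldl_round]; simp
  have hget : PySem.List.pyGet?
      (arr.foldl (fun d num => pvRound num d)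
        (PySem.Set.add PySem.Set.empty (0 : Int) :: List.replicate m.toNat PySem.Set.empty)) m
      = some ((arr.foldl (fun d num => pvRound num d)
        (PySem.Set.add PySem.Set.empty (0 : Int) :: List.replicate m.toNat PySem.Set.empty)).getD
          m.toNat PySem.Set.empty) := by
    rw [PySem.List.pyGet?_of_nonneg _ hm,
        List.getElem?_eq_getElem (by omega),
        List.getD_eq_getElem _ _ (by omega)]
  rw [hget, Option.getD_some]
  have hmem : ∀ v : Int,
      v ∈ ((pvCombos m.toNat arr).map
            (fun s => s.foldl (fun a b => PySem.Int.bxor a b) 0)) ↔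
      v ∈ (arr.foldl (fun d num => pvRound num d)
        (PySem.Set.add PySem.Set.empty (0 : Int) :: List.replicate m.toNat PySem.Set.empty)).getD
          m.toNat PySem.Set.empty := by
    intro v
    rw [pv_main arr _ m.toNat v (by simp)]
    constructor
    · rintro hv
      rcases List.mem_map.mp hv with ⟨s, hs, rfl⟩
      refine ⟨0, Nat.zero_le _, s, by simpa using hs, 0, ?_, rfl⟩
      exact (PySem.Set.mem_add (PySem.Set.empty : PySem.Set Int) (0 : Int) (0 : Int)).mpr (Or.inr rfl)
    · rintro ⟨i, hij, s, hs, w, hw, rfl⟩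
      cases i with
      | zero =>
        simp only [List.getD_cons_zero] at hw
        rcases (PySem.Set.mem_add _ _ _).mp hw with h | rfl
        · simp [PySem.Set.empty] at h
        · exact List.mem_map.mpr ⟨s, by simpa using hs, rfl⟩
      | succ i =>
        simp only [List.getD_cons_succ, pv_getD_replicate_empty] at hw
        simp [PySem.Set.empty] at hw
  have hcg := pv_fm_congr _ _ hmem
  rw [List.foldl_map] at hcg
  exact hcg

-- ===== VERDICT (by name: the statement is the Claim_ definition above) =====
theorem max_xor_subset_spec : Claim_equal_max_xor_subset := by
  intro arr m _ hm
  unfold Spec_max_xor_subset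
  exact pv_final arr m hm
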